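-- pv_equiv track=rewrite | github.com/Eva-happy/cursor | 电费节省使用最佳容量和自定义容量对比.py | find_continuous_window
-- ===== SOURCE A (Python) =====
-- def find_continuous_window(periods, target_types, min_duration, start_hour=0):
--     """查找第一个满足条件的连续时间窗口"""
--     n = len(periods)
--     current_start = -1
--     count = 0
--     for i in range(start_hour, n):
--         if periods[i] in target_types:
--             if count == 0:
--                 current_start = i
--             count += 1
--             if count >= min_duration:
--                 # 找到满足最短持续时间的窗口
--                 # 现在检查这个窗口后面连续同类型时段的总长度
--                 total_duration = count
--                 for j in range(i + 1, n):
--                     if periods[j] in target_types: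
--                         total_duration += 1
--                     else:
--                         break
--                 return current_start, min_duration, total_duration # 返回开始时间, 要求的最短时间, 实际连续总时间
--         else:
--             count = 0
--             current_start = -1
--     return None, None, None # 未找到
-- ===== SOURCE B (Python) =====
-- def find_continuous_window(periods, target_types, min_duration, start_hour=0):
--     """Single run-boundary pass: close each maximal run of target types and
--     return the first run whose length reaches min_duration."""
--     n = len(periods)
--     run_start = None
--     run_len = 0
--     for i in range(start_hour, n):
--         if periods[i] in target_types:
--             if run_len == 0:
--                 run_start = i
--             run_len += 1
--         else:
--             if run_len >= min_duration and run_len > 0: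
--                 return run_start, min_duration, run_len
--             run_start, run_len = None, 0
--     if run_len >= min_duration and run_len > 0:
--         return run_start, min_duration, run_len
--     return None, None, None
-- ===== Notes on version B (the rewrite author's own statement) =====
-- stated objective: simpler
-- what changed: Replaces A's early-detect (count reaches min_duration mid-run) plus nested extension loop with a single run-boundary pass that closes each maximal run and returns the first run whose length reaches min_duration.
import Mathlib
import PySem

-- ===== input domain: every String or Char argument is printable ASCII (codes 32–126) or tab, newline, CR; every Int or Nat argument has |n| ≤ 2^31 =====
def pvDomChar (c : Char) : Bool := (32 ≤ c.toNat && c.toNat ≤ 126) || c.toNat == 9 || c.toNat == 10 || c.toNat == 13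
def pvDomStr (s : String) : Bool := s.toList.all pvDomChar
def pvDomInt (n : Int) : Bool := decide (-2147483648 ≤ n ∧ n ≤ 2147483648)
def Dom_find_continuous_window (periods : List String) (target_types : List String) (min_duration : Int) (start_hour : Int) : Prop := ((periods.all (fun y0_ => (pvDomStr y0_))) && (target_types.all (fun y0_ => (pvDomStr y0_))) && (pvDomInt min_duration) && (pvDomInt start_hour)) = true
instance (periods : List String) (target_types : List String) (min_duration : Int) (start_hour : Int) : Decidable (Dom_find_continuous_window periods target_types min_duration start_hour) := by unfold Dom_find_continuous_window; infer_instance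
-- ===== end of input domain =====

-- B replaces A's detect-then-nested-extend structure by one run-boundary pass
-- (close each maximal run, return the first whose length reaches min_duration): simpler, same cost.

-- ===== PORT A =====
-- Python's `periods[i] in target_types` (pyGet? = none only where Python raises IndexError, outside Pre_)
def pvIsTarget (periods : List String) (target_types : List String) (i : Int) : Bool :=
  (PySem.List.pyGet? periods i).any (fun s => target_types.contains s)

-- inner `for j in range(i+1, n)` extension loop of A
def fcwA_extend (periods : List String) (target_types : List String) (js : List Int) (total : Int) : Int :=
  match js with
  | [] => total
  | j :: rest =>
    if pvIsTarget periods target_types j then fcwA_extend periods target_types rest (total + 1)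
    else total

-- outer `for i in range(start_hour, n)` loop of A, with its early return
def fcwA_loop (periods : List String) (target_types : List String) (min_duration : Int) (n : Int)
    (is : List Int) (current_start : Int) (count : Int) : Option Int × Option Int × Option Int :=
  match is with
  | [] => (none, none, none)
  | i :: rest =>
    if pvIsTarget periods target_types i then
      let cs := if count = 0 then i else current_start
      let c := count + 1
      if c ≥ min_duration then
        (some cs, some min_duration,
          some (fcwA_extend periods target_types (PySem.List.pyRange (i + 1) n 1) c))
      else
        fcwA_loop periods target_types min_duration n rest cs c
    else
      fcwA_loop periods target_types min_duration n rest (-1) 0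

def find_continuous_window (periods : List String) (target_types : List String) (min_duration : Int) (start_hour : Int) : Option Int × Option Int × Option Int :=
  fcwA_loop periods target_types min_duration (PySem.List.len periods)
    (PySem.List.pyRange start_hour (PySem.List.len periods) 1) (-1) 0

-- ===== PORT B =====
-- single pass of Source B: maintain (run_start, run_len); close the run at a non-target or at the end
def fcwB_loop (periods : List String) (target_types : List String) (min_duration : Int)
    (is : List Int) (run_start : Option Int) (run_len : Int) : Option Int × Option Int × Option Int :=
  match is with
  | [] =>
    if run_len ≥ min_duration ∧ run_len > 0 then (run_start, some min_duration, some run_len)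
    else (none, none, none)
  | i :: rest =>
    if pvIsTarget periods target_types i then
      fcwB_loop periods target_types min_duration rest
        (if run_len = 0 then some i else run_start) (run_len + 1)
    else if run_len ≥ min_duration ∧ run_len > 0 then (run_start, some min_duration, some run_len)
    else fcwB_loop periods target_types min_duration rest none 0

def find_continuous_window_alt (periods : List String) (target_types : List String) (min_duration : Int) (start_hour : Int) : Option Int × Option Int × Option Int :=
  fcwB_loop periods target_types min_duration
    (PySem.List.pyRange start_hour (PySem.List.len periods) 1) none 0

-- ===== PRECONDITION & SPEC =====
-- Pre_ excludes exactly start_hour < -len(periods), where Python A raises IndexError on periods[start_hour]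
def Pre_find_continuous_window (periods : List String) (target_types : List String) (min_duration : Int) (start_hour : Int) : Prop :=
  -(periods.length : Int) ≤ start_hour
instance (periods : List String) (target_types : List String) (min_duration : Int) (start_hour : Int) : Decidable (Pre_find_continuous_window periods target_types min_duration start_hour) := by unfold Pre_find_continuous_window; infer_instance
def pvWitness_find_continuous_window : List String × List String × Int × Int := (["a", "b", "a", "a"], ["a"], 2, 0)

def Spec_find_continuous_window (periods : List String) (target_types : List String) (min_duration : Int) (start_hour : Int) (out : Option Int × Option Int × Option Int) : Prop := out = find_continuous_window_alt periods target_types min_duration start_hour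
instance (periods : List String) (target_types : List String) (min_duration : Int) (start_hour : Int) (out : Option Int × Option Int × Option Int) : Decidable (Spec_find_continuous_window periods target_types min_duration start_hour out) := by unfold Spec_find_continuous_window; infer_instance

-- ===== CLAIM (what is proved, stated in full; the proofs are below) =====
def Claim_equal_find_continuous_window : Prop := ∀ (periods : List String) (target_types : List String) (min_duration : Int) (start_hour : Int), Dom_find_continuous_window periods target_types min_duration start_hour → Pre_find_continuous_window periods target_types min_duration start_hour → Spec_find_continuous_window periods target_types min_duration start_hour (find_continuous_window periods target_types min_duration start_hour)

-- ===== LEMMAS AND PROOFS =====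

-- Once the current run has already reached min_duration, B's loop just keeps extending it
-- exactly as A's inner extension loop does, and returns at the run boundary.
theorem fcwB_loop_extend (periods target_types : List String) (min_duration : Int)
    (js : List Int) (rs : Option Int) (rl : Int) (h1 : rl ≥ min_duration) (h2 : rl > 0) :
    fcwB_loop periods target_types min_duration js rs rl
      = (rs, some min_duration, some (fcwA_extend periods target_types js rl)) := by
  induction js generalizing rl with
  | nil => simp [fcwB_loop, fcwA_extend, h1, h2]
  | cons j rest ih =>
    by_cases ht : pvIsTarget periods target_types j
    · have : ¬ rl = 0 := by omega
      simp only [fcwB_loop, fcwA_extend, ht, if_true, this, if_false]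
      exact ih (rl + 1) (by omega) (by omega)
    · simp [fcwB_loop, fcwA_extend, ht, h1, h2]

-- Lockstep invariant between A's loop state (current_start, count) and B's (run_start, run_len)
-- over the index range: run_len = count; a live run has run_start = some current_start and
-- count still below min_duration (else A would already have returned).
theorem fcw_loop_agree (periods target_types : List String) (min_duration n : Int)
    (is : List Int) (k : Int) (hk : is = PySem.List.pyRange k n 1)
    (cs c : Int) (rs : Option Int)
    (hinv : (c = 0 ∧ rs = none) ∨ (0 < c ∧ c < min_duration ∧ rs = some cs)) :
    fcwA_loop periods target_types min_duration n is cs c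
      = fcwB_loop periods target_types min_duration is rs c := by
  induction is generalizing k cs c rs with
  | nil =>
    have hc : ¬ (c ≥ min_duration ∧ c > 0) := by rcases hinv with ⟨h0, _⟩ | ⟨h1, h2, _⟩ <;> omega
    simp [fcwA_loop, fcwB_loop, hc]
  | cons i rest ih =>
    have hkn : k < n := by
      by_contra h
      rw [PySem.List.pyRange_one_eq_nil (by omega)] at hk
      exact List.cons_ne_nil i rest hk
    rw [PySem.List.pyRange_one_cons hkn] at hk
    obtain ⟨hik, hrest⟩ : i = k ∧ rest = PySem.List.pyRange (k + 1) n 1 := by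
      constructor <;> [exact (List.cons.injEq ..).mp hk |>.1; exact (List.cons.injEq ..).mp hk |>.2]
    by_cases ht : pvIsTarget periods target_types i
    · have hrs : (if c = 0 then some i else rs) = some (if c = 0 then i else cs) := by
        rcases hinv with ⟨h0, h1⟩ | ⟨h1, h2, h3⟩
        · simp [h0, h1]
        · have hc0 : ¬ c = 0 := by omega
          simp [hc0, h3]
      by_cases hmd : c + 1 ≥ min_duration
      · simp only [fcwA_loop, fcwB_loop, ht, if_true, hmd, if_true, hrs]
        rw [fcwB_loop_extend periods target_types min_duration rest _ (c + 1) (by omega)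
            (by rcases hinv with ⟨h0, _⟩ | ⟨h1, _, _⟩ <;> omega)]
        rw [hrest, hik]
      · simp only [fcwA_loop, fcwB_loop, ht, if_true, hmd, if_false, hrs]
        exact ih (k + 1) hrest _ _ _ (Or.inr ⟨by
          rcases hinv with ⟨h0, _⟩ | ⟨h1, _, _⟩ <;> omega, by omega, rfl⟩)
    · have hc : ¬ (c ≥ min_duration ∧ c > 0) := by
        rcases hinv with ⟨h0, _⟩ | ⟨h1, h2, _⟩ <;> omega
      simp only [fcwA_loop, fcwB_loop, ht, if_false, hc]
      exact ih (k + 1) hrest _ _ _ (Or.inl ⟨rfl, rfl⟩)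

-- ===== VERDICT (by name: the statement is the Claim_ definition above) =====
theorem find_continuous_window_spec : Claim_equal_find_continuous_window := by
  intro periods target_types min_duration start_hour _ _
  unfold Spec_find_continuous_window find_continuous_window find_continuous_window_alt
  exact fcw_loop_agree periods target_types min_duration (PySem.List.len periods) _
    start_hour rfl (-1) 0 none (Or.inl ⟨rfl, rfl⟩)
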